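-- pv_equiv track=rewrite | github.com/grantcurell/rock-frontend | backend/app/common_controller.py | _is_valid_ip_block
-- ===== SOURCE A (Python) =====
-- from typing import List
--
-- def _is_valid_ip_block(available_ip_addresses: List[str], index: int) -> bool:
--     """
--     Ensures that the /28 IP blocks ip are all available.
--     If a given /28 blocks IP address has been taken by some other node on the network,
--     the block gets thrown out.
--
--     :param available_ip_addresses: A list of unused IP on the subnet.
--     :param index:
--     """
--     cached_octet = None
--     for i, ip in enumerate(available_ip_addresses[index:]):
--         pos = ip.rfind('.') + 1
--         last_octet = int(ip[pos:])
--         if cached_octet is None: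
--             cached_octet = last_octet
--         else:
--             if (cached_octet + 1) == last_octet:
--                 cached_octet = last_octet
--             else:
--                 return False
--
--         if i == 15:
--             break
--     return True
-- ===== SOURCE B (Python) =====
-- from typing import List
--
-- def _is_valid_ip_block(available_ip_addresses: List[str], index: int) -> bool:
--     # Recursive absolute-offset check: octet at position k must equal base + k,
--     # where base is the first entry's last octet (vs A's iterative successor chain).
--     block = available_ip_addresses[index:]
--     if not block:
--         return True
--
--     def ok(k: int, base: int) -> bool:
--         if k >= 16 or k >= len(block):
--             return True
--         ip = block[k]
--         if int(ip[ip.rfind('.') + 1:]) != base + k: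
--             return False
--         return ok(k + 1, base)
--
--     first = block[0]
--     return ok(1, int(first[first.rfind('.') + 1:]))
-- ===== Notes on version B (the rewrite author's own statement) =====
-- stated objective: alternative
-- what changed: Replaces A's iterative successor-chain scan (sentinel cached_octet carrying the previous octet, early return, i==15 break) by a recursive absolute-offset check: the first entry's octet is the base, and position k must satisfy octet == base + k; same lazy left-to-right parsing order, so B returns and raises exactly where A does.
-- outside the precondition, e.g. on _is_valid_ip_block(['a.1', 'a.3', 'bad'], 0): A returns False, B returns False
import Mathlib
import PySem

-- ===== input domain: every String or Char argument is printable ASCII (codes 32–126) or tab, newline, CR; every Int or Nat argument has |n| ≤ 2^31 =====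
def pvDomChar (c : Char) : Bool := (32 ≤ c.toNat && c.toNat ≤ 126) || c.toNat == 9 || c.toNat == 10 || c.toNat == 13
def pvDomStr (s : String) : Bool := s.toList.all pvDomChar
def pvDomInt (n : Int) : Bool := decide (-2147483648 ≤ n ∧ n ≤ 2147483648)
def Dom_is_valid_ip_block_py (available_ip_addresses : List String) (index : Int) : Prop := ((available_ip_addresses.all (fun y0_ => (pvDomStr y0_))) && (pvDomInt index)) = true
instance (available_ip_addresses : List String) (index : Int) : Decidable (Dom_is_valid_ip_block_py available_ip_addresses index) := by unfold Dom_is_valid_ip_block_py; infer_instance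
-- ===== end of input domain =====

-- B replaces A's iterative successor-chain scan by a recursive absolute-offset check
-- (octet at position k must equal base + k); objective: alternative.

-- shared helper: int(ip[ip.rfind('.') + 1:])  (none = ValueError, excluded by Pre_)
def octet? (ip : String) : Option Int :=
  PySem.Int.ofStr? (PySem.Str.slice ip (some (PySem.Str.rfind ip "." + 1)) none)

-- ===== PORT A =====
-- the for-loop body from the second iteration on: state = (i, cached_octet)
def isValidLoopA : List String → Nat → Int → Bool
  | [], _, _ => true
  | ip :: rest, i, cached =>
    match octet? ip with
    | none => false                 -- int() raises here in Python (outside Pre_)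
    | some last =>
      if cached + 1 = last then
        (if i == 15 then true else isValidLoopA rest (i + 1) last)
      else false

def is_valid_ip_block_py (available_ip_addresses : List String) (index : Int) : Bool :=
  match PySem.List.slice available_ip_addresses (some index) none with
  | [] => true
  | ip :: rest =>
    match octet? ip with
    | none => false                 -- int() raises here in Python (outside Pre_)
    | some last =>
      if (0 : Nat) == 15 then true else isValidLoopA rest 1 last

-- ===== PORT B =====
-- B's inner `ok(k, base)`: position k of the block must carry octet base + k
def okB (block : List String) (k : Nat) (base : Int) : Bool :=
  if _h : 16 ≤ k ∨ block.length ≤ k then true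
  else
    match block[k]? with
    | none => true                  -- unreachable: ¬ block.length ≤ k
    | some ip =>
      if (octet? ip).getD 0 ≠ base + (k : Int) then false   -- getD: ValueError excluded by Pre_
      else okB block (k + 1) base
termination_by 16 - k
decreasing_by omega

def is_valid_ip_block_py_alt (available_ip_addresses : List String) (index : Int) : Bool :=
  match PySem.List.slice available_ip_addresses (some index) none with
  | [] => true
  | first :: rest => okB (first :: rest) 1 ((octet? first).getD 0)   -- getD: ValueError excluded by Pre_

-- ===== PRECONDITION & SPEC =====
-- Pre_ excludes inputs where some of the first sixteen entries of the slice has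
-- non-int-parseable text after its last '.': Python's int() raises ValueError when the
-- scan reaches such an entry; when an earlier mismatch stops the scan first, A and B
-- both return False, but those inputs are conservatively excluded as well.
def Pre_is_valid_ip_block_py (available_ip_addresses : List String) (index : Int) : Prop :=
  ∀ ip ∈ (PySem.List.slice available_ip_addresses (some index) none).take 16, (octet? ip).isSome

instance (available_ip_addresses : List String) (index : Int) : Decidable (Pre_is_valid_ip_block_py available_ip_addresses index) := by unfold Pre_is_valid_ip_block_py; infer_instance

def pvWitness_is_valid_ip_block_py : List String × Int := (["10.0.0.1", "10.0.0.2"], 0)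

def Spec_is_valid_ip_block_py (available_ip_addresses : List String) (index : Int) (out : Bool) : Prop := out = is_valid_ip_block_py_alt available_ip_addresses index
instance (available_ip_addresses : List String) (index : Int) (out : Bool) : Decidable (Spec_is_valid_ip_block_py available_ip_addresses index out) := by unfold Spec_is_valid_ip_block_py; infer_instance

-- ===== CLAIM (what is proved, stated in full; the proofs are below) =====
def Claim_equal_is_valid_ip_block_py : Prop := ∀ (available_ip_addresses : List String) (index : Int), Dom_is_valid_ip_block_py available_ip_addresses index → Pre_is_valid_ip_block_py available_ip_addresses index → Spec_is_valid_ip_block_py available_ip_addresses index (is_valid_ip_block_py available_ip_addresses index)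

-- ===== LEMMAS AND PROOFS =====

-- the two scans agree: A walks the suffix with the previous octet, B walks indices with
-- the base; invariant cached + 1 = base + k
theorem loopA_eq_okB (block : List String)
    (hp : ∀ ip ∈ block.take 16, (octet? ip).isSome) :
    ∀ (m k : Nat) (cached base : Int), m = 16 - k → 1 ≤ k → k ≤ 15 → cached + 1 = base + (k : Int) →
      isValidLoopA (block.drop k) k cached = okB block k base := by
  intro m
  induction m using Nat.strong_induction_on with
  | _ m ih =>
    intro k cached base hm hk1 hk15 hinv
    rw [okB]
    by_cases hlen : block.length ≤ k
    · have hdrop : block.drop k = [] := List.drop_eq_nil_of_le hlen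
      rw [hdrop]
      simp [isValidLoopA, hlen]
    · have hkl : k < block.length := by omega
      have hget : block[k]? = some block[k] := List.getElem?_eq_getElem hkl
      have hdrop : block.drop k = block[k] :: block.drop (k + 1) := by
        rw [List.drop_eq_getElem_cons hkl]
      have hmem : block[k] ∈ block.take 16 := by
        have hlt : k < (block.take 16).length := by
          simp only [List.length_take]; omega
        have hgm := List.getElem_mem hlt
        simpa [List.getElem_take] using hgm
      obtain ⟨last, hlast⟩ := Option.isSome_iff_exists.mp (hp _ hmem)
      rw [dif_neg (by omega), hget, hdrop]
      simp only [isValidLoopA, hlast, Option.getD_some]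
      by_cases hc : cached + 1 = last
      · have heq : ¬ last ≠ base + (k : Int) := by omega
        rw [if_pos hc, if_neg heq]
        by_cases h15 : k = 15
        · subst h15
          rw [okB]
          simp
        · have : (k == 15) = false := by simp [h15]
          rw [this]
          simp only [Bool.false_eq_true, if_false]
          exact ih (16 - (k + 1)) (by omega) (k + 1) last base rfl (by omega) (by omega)
            (by push_cast; omega)
      · have hne : last ≠ base + (k : Int) := by omega
        rw [if_neg hc, if_pos hne]

theorem is_valid_ip_block_py_spec : Claim_equal_is_valid_ip_block_py := by
  intro xs index _ hpre
  unfold Spec_is_valid_ip_block_py is_valid_ip_block_py is_valid_ip_block_py_alt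
  unfold Pre_is_valid_ip_block_py at hpre
  cases hys : PySem.List.slice xs (some index) none with
  | nil => rfl
  | cons first rest =>
    rw [hys] at hpre
    have hfirst : (octet? first).isSome := by apply hpre; simp
    obtain ⟨o0, ho0⟩ := Option.isSome_iff_exists.mp hfirst
    simp only [ho0, Option.getD_some, show ((0:Nat) == 15) = false from rfl,
      Bool.false_eq_true, if_false]
    have hdrop : (first :: rest).drop 1 = rest := rfl
    rw [← hdrop]
    exact loopA_eq_okB (first :: rest) hpre (16 - 1) 1 o0 o0 rfl (by omega) (by omega)
      (by push_cast; omega)
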